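-- pv_equiv track=rewrite | github.com/jayliu9/Draughts | Homework/HW 5/password.py | secure_password
-- ===== SOURCE A (Python) =====
-- def secure_password(user_in):
--     '''
--         Function -- secure_password
--             Checks whether or not the supplied string is a secure password
--         Parameter:
--             user_in -- A string to consider.
--         Returns:
--             True if the supplied string is a secure password, False otherwise
--     '''
--     MINIMUM_LENGTH = 9
--     MAXIMUM_LENGTH = 12
--     LOWERCASE_LETTER = "abcdefghijklmnopqrstuvwxyz"
--     UPPERCASE_LETTER = "ABCDEFGHIJKLMNOPQRSTUVWXYZ"
--     DIGIT = "0123456789"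
--     SPECIAL_CHARACTER = "$#@!"
--     MINIMUM_VALID_BOOL_SUM = 1
--
--     is_valid_length = (len(user_in) >= MINIMUM_LENGTH and
--                        len(user_in) <= MAXIMUM_LENGTH)
--     if not is_valid_length:
--         return False
--     lowercase_bool_sum = 0
--     uppercase_bool_sum = 0
--     digit_bool_sum = 0
--     special_character_bool_sum = 0
--     requirements_bool_sum = 0
--     for character in user_in:
--         if character not in (LOWERCASE_LETTER + UPPERCASE_LETTER + DIGIT +
--                              SPECIAL_CHARACTER):
--             return False
--         lowercase_bool_sum += character in LOWERCASE_LETTER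
--         uppercase_bool_sum += character in UPPERCASE_LETTER
--         digit_bool_sum += character in DIGIT
--         special_character_bool_sum += character in SPECIAL_CHARACTER
--     requirement_bool_sum = ((lowercase_bool_sum >= MINIMUM_VALID_BOOL_SUM) +
--                             (uppercase_bool_sum >= MINIMUM_VALID_BOOL_SUM) +
--                             (digit_bool_sum >= MINIMUM_VALID_BOOL_SUM) +
--                             (special_character_bool_sum >=
--                              MINIMUM_VALID_BOOL_SUM))
--     meet_requirements = requirement_bool_sum >= 3
--     if meet_requirements:
--         return True
--     return False
-- ===== SOURCE B (Python) =====
-- def secure_password(user_in):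
--     '''Idiomatic set-based rewrite: validity and category presence via set operations; no per-character counting loop.'''
--     LOWERCASE_LETTER = "abcdefghijklmnopqrstuvwxyz"
--     UPPERCASE_LETTER = "ABCDEFGHIJKLMNOPQRSTUVWXYZ"
--     DIGIT = "0123456789"
--     SPECIAL_CHARACTER = "$#@!"
--     if not (9 <= len(user_in) <= 12):
--         return False
--     chars = set(user_in)
--     if not chars.issubset(set(LOWERCASE_LETTER + UPPERCASE_LETTER + DIGIT + SPECIAL_CHARACTER)):
--         return False
--     categories = (LOWERCASE_LETTER, UPPERCASE_LETTER, DIGIT, SPECIAL_CHARACTER)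
--     return sum(bool(chars & set(cat)) for cat in categories) >= 3
-- ===== Notes on version B (the rewrite author's own statement) =====
-- stated objective: idiomatic
-- what changed: The per-character accumulation loop with four running counters and an early-return validity test is replaced by building set(user_in) once and deciding validity via set.issubset and each category's presence via a set intersection; no counting loop remains.
import Mathlib
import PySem

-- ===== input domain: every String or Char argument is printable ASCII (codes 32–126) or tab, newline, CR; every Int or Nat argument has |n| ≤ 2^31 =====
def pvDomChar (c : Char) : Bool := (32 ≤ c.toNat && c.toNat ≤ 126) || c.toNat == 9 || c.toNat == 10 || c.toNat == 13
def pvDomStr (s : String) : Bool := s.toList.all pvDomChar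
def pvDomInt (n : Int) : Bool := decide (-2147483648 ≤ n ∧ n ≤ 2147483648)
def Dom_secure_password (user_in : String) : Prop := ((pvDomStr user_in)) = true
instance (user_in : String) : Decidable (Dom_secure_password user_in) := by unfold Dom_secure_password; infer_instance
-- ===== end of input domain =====

-- B replaces A's per-character counting loop with one set(user_in) plus issubset and category intersections (idiomatic).

-- ===== PORT A =====
-- shared character-class constants (the literal strings of both Pythons)
def spLow : List Char := "abcdefghijklmnopqrstuvwxyz".toList
def spUp : List Char := "ABCDEFGHIJKLMNOPQRSTUVWXYZ".toList
def spDig : List Char := "0123456789".toList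
def spSpec : List Char := "$#@!".toList

-- the final requirement computation after A's loop
def spScore (l u d s : Nat) : Bool :=
  decide (3 ≤ (if 1 ≤ l then (1:Nat) else 0) + (if 1 ≤ u then 1 else 0) +
              (if 1 ≤ d then 1 else 0) + (if 1 ≤ s then 1 else 0))

-- A's for-loop with early return False; 'character in STR' is exact as list membership for single chars
def spLoop : List Char → Nat → Nat → Nat → Nat → Bool
  | [], l, u, d, s => spScore l u d s
  | c :: rest, l, u, d, s =>
    if ¬ ((spLow ++ spUp ++ spDig ++ spSpec).contains c) then false
    else spLoop rest (l + if spLow.contains c then 1 else 0)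
                     (u + if spUp.contains c then 1 else 0)
                     (d + if spDig.contains c then 1 else 0)
                     (s + if spSpec.contains c then 1 else 0)

def secure_password (user_in : String) : Bool :=
  if ¬ (9 ≤ PySem.Str.len user_in ∧ PySem.Str.len user_in ≤ 12) then false
  else spLoop user_in.toList 0 0 0 0

-- ===== PORT B =====
def secure_password_alt (user_in : String) : Bool :=
  if ¬ (9 ≤ PySem.Str.len user_in ∧ PySem.Str.len user_in ≤ 12) then false
  else
    let chars : PySem.Set Char := PySem.Set.ofList user_in.toList
    if ¬ (PySem.Set.issubset chars (PySem.Set.ofList (spLow ++ spUp ++ spDig ++ spSpec))) then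
      false
    else
      decide (3 ≤ ([spLow, spUp, spDig, spSpec].map (fun cat =>
        if PySem.Set.inter chars (PySem.Set.ofList cat) = ([] : List Char) then (0:Nat) else 1)).sum)

-- ===== PRECONDITION & SPEC =====
def Spec_secure_password (user_in : String) (out : Bool) : Prop := out = secure_password_alt user_in
instance (user_in : String) (out : Bool) : Decidable (Spec_secure_password user_in out) := by unfold Spec_secure_password; infer_instance

-- ===== CLAIM (what is proved, stated in full; the proofs are below) =====
def Claim_equal_secure_password : Prop := ∀ (user_in : String), Dom_secure_password user_in → Spec_secure_password user_in (secure_password user_in)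

-- ===== LEMMAS AND PROOFS =====

-- A's loop characterised: all characters valid, counters become countP
theorem spLoop_eq (xs : List Char) : ∀ l u d s, spLoop xs l u d s =
    if xs.all (fun c => (spLow ++ spUp ++ spDig ++ spSpec).contains c) then
      spScore (l + xs.countP (spLow.contains ·)) (u + xs.countP (spUp.contains ·))
              (d + xs.countP (spDig.contains ·)) (s + xs.countP (spSpec.contains ·))
    else false := by
  induction xs with
  | nil => intro l u d s; simp [spLoop]
  | cons c rest ih =>
    intro l u d s
    have hstep : spLoop (c :: rest) l u d s =
        if ¬(((spLow ++ spUp ++ spDig ++ spSpec).contains c) = true) then false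
        else spLoop rest (l + if spLow.contains c then 1 else 0)
                         (u + if spUp.contains c then 1 else 0)
                         (d + if spDig.contains c then 1 else 0)
                         (s + if spSpec.contains c then 1 else 0) := rfl
    by_cases h : ((spLow ++ spUp ++ spDig ++ spSpec).contains c) = true
    · rw [hstep, if_neg (not_not_intro h), ih, List.all_cons, h, Bool.true_and,
        List.countP_cons, List.countP_cons, List.countP_cons, List.countP_cons]
      by_cases hr : (rest.all fun c => (spLow ++ spUp ++ spDig ++ spSpec).contains c) = true
      · rw [if_pos hr, if_pos hr]
        have e : ∀ (x y z : Nat), x + y + z = x + (z + y) := fun x y z => by omega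
        rw [e l, e u, e d, e s]
      · rw [if_neg hr, if_neg hr]
    · rw [hstep, if_pos h,
        if_neg (fun hc => h (by rw [List.all_cons, Bool.and_eq_true] at hc; exact hc.1))]

-- subset test over set(xs) is the all-characters-valid test
theorem issubset_ofList_eq (xs T : List Char) :
    PySem.Set.issubset (PySem.Set.ofList xs) (PySem.Set.ofList T) = xs.all (T.contains ·) := by
  rw [Bool.eq_iff_iff]
  simp only [PySem.Set.issubset, PySem.Set.contains, List.all_eq_true, List.contains_iff_mem,
    PySem.Set.mem_ofList]

-- category indicator: positive count ↔ nonempty intersection with set(xs)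
theorem indicator_eq (xs cat : List Char) :
    (if 1 ≤ xs.countP (cat.contains ·) then (1:Nat) else 0) =
    (if PySem.Set.inter (PySem.Set.ofList xs) (PySem.Set.ofList cat) = ([] : List Char) then 0 else 1) := by
  by_cases h : ∃ a ∈ xs, a ∈ cat
  · have h1 : 1 ≤ xs.countP (cat.contains ·) := by
      have : 0 < xs.countP (cat.contains ·) := by
        simp only [List.countP_pos_iff, List.contains_iff_mem]; exact h
      omega
    have h2 : PySem.Set.inter (PySem.Set.ofList xs) (PySem.Set.ofList cat) ≠ ([] : List Char) := by
      simp only [PySem.Set.inter, PySem.Set.contains, ne_eq, List.filter_eq_nil_iff,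
        List.contains_iff_mem, PySem.Set.mem_ofList]
      exact fun hall => by obtain ⟨a, ha, hc⟩ := h; exact hall a ha hc
    rw [if_pos h1, if_neg h2]
  · have h1 : xs.countP (cat.contains ·) = 0 := by
      simp only [List.countP_eq_zero, List.contains_iff_mem]
      exact fun a ha hc => h ⟨a, ha, hc⟩
    have h2 : PySem.Set.inter (PySem.Set.ofList xs) (PySem.Set.ofList cat) = ([] : List Char) := by
      simp only [PySem.Set.inter, PySem.Set.contains, List.filter_eq_nil_iff,
        List.contains_iff_mem, PySem.Set.mem_ofList]
      exact fun a ha hc => h ⟨a, ha, hc⟩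
    rw [h1, if_neg (by omega : ¬ 1 ≤ (0:Nat)), if_pos h2]

-- ===== VERDICT (by name: the statement is the Claim_ definition above) =====
theorem secure_password_spec : Claim_equal_secure_password := by
  intro user_in _
  unfold Spec_secure_password secure_password secure_password_alt
  by_cases hlen : 9 ≤ PySem.Str.len user_in ∧ PySem.Str.len user_in ≤ 12
  · rw [if_neg (not_not_intro hlen), if_neg (not_not_intro hlen), spLoop_eq]
    simp only [issubset_ofList_eq]
    by_cases hall : (user_in.toList.all fun c => (spLow ++ spUp ++ spDig ++ spSpec).contains c) = true
    · rw [if_pos hall, if_neg (not_not_intro hall)]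
      simp only [List.map_cons, List.map_nil, List.sum_cons, List.sum_nil, Nat.add_zero,
        Nat.zero_add, ← indicator_eq, spScore, Nat.add_assoc]
    · rw [if_neg hall, if_pos hall]
  · rw [if_pos hlen, if_pos hlen]
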